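-- pv_equiv track=rewrite | github.com/subu0106/KGX-Graph-Similarity | Methods/semantic_wl_kernel_chamath.py | groups_are_stable
-- ===== SOURCE A (Python) =====
-- from typing import List, Tuple, Dict, Set, Optional
--
-- def groups_are_stable(prev_groups: Dict[str, int], curr_groups: Dict[str, int]) -> bool:
--     """Check whether node group partitioning has stabilised between iterations."""
--     if set(prev_groups.keys()) != set(curr_groups.keys()):
--         return False
--
--     def get_partition(groups: Dict[str, int]) -> Set[frozenset]:
--         partition: Dict[int, set] = {}
--         for node, gid in groups.items():
--             partition.setdefault(gid, set()).add(node)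
--         return {frozenset(s) for s in partition.values()}
--
--     return get_partition(prev_groups) == get_partition(curr_groups)
-- ===== SOURCE B (Python) =====
-- def groups_are_stable(prev_groups, curr_groups):
--     """Check whether node group partitioning has stabilised between iterations."""
--     if set(prev_groups.keys()) != set(curr_groups.keys()):
--         return False
--     fwd, bwd = {}, {}
--     for node, p in prev_groups.items():
--         c = curr_groups[node]
--         if fwd.setdefault(p, c) != c or bwd.setdefault(c, p) != p:
--             return False
--     return True
-- ===== Notes on version B (the rewrite author's own statement) =====
-- stated objective: alternative
-- what changed: Instead of materialising both partitions as sets of frozensets and comparing them, B makes one pass over the nodes maintaining a forward and a backward label map and checks that the prev-label/curr-label relation is a bijection, which holds iff the partitions coincide.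
import Mathlib
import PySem

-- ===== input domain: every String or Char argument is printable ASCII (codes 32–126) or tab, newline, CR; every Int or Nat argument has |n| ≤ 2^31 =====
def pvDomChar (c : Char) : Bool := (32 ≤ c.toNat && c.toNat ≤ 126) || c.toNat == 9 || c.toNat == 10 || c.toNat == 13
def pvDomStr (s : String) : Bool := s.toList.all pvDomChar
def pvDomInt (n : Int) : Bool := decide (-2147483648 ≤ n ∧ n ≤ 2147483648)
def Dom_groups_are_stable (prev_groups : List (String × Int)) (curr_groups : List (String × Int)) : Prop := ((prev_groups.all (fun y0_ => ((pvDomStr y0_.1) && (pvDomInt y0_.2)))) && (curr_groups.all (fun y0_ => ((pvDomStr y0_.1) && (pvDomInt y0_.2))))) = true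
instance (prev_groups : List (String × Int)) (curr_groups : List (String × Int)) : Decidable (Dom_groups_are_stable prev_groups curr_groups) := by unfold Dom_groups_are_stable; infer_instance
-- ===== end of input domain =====

-- B replaces A's set-of-frozensets partition comparison by a single pass that checks the
-- prev-label/curr-label relation is a bijection (a forward and a backward label map); objective: alternative algorithm, same cost.


-- ===== PORT A =====
-- partition: Dict[int, set] built by 'partition.setdefault(gid, set()).add(node)' over groups.items()
def pvPartitionDict (groups : List (String × Int)) : PySem.Dict Int (PySem.Set String) :=
  groups.foldl (fun d pr => d.modify pr.2 PySem.Set.empty (fun s => PySem.Set.add s pr.1)) PySem.Dict.empty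

-- '{frozenset(s) for s in partition.values()}': a set whose elements are frozensets; Python's
-- frozenset '==' (the dedup membership test) is set equality, so it is PySem.Set.equal — exact.
def pvSetOfSets (vs : List (PySem.Set String)) : List (PySem.Set String) :=
  vs.foldl (fun acc s => if acc.any (fun t => PySem.Set.equal t s) then acc else acc ++ [s]) []

def pvGetPartition (groups : List (String × Int)) : List (PySem.Set String) :=
  pvSetOfSets (pvPartitionDict groups).values

-- Python '==' on two sets of frozensets: mutual inclusion with frozenset (set) equality — exact.
def pvPartsEq (s t : List (PySem.Set String)) : Bool :=
  s.all (fun x => t.any (fun y => PySem.Set.equal x y)) && t.all (fun y => s.any (fun x => PySem.Set.equal y x))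

def groups_are_stable (prev_groups : List (String × Int)) (curr_groups : List (String × Int)) : Bool :=
  if !(PySem.Set.equal (PySem.Set.ofList (prev_groups.map Prod.fst)) (PySem.Set.ofList (curr_groups.map Prod.fst))) then
    false
  else
    pvPartsEq (pvGetPartition prev_groups) (pvGetPartition curr_groups)

-- ===== PORT B =====
-- the loop 'for node, p in prev_groups.items(): …' with forward and backward label maps
def pvStableLoop (currD : PySem.Dict String Int) :
    List (String × Int) → PySem.Dict Int Int → PySem.Dict Int Int → Bool
  | [], _, _ => true
  | (node, p) :: rest, fwd, bwd =>
    match currD.get? node with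
    | none => false   -- unreachable after the key-set check (Python: KeyError)
    | some c =>
      -- 'fwd.setdefault(p, c) != c or bwd.setdefault(c, p) != p'
      if ((fwd.setdefault p c).getD p c ≠ c) ∨ ((bwd.setdefault c p).getD c p ≠ p) then false
      else pvStableLoop currD rest (fwd.setdefault p c) (bwd.setdefault c p)

def groups_are_stable_alt (prev_groups : List (String × Int)) (curr_groups : List (String × Int)) : Bool :=
  if !(PySem.Set.equal (PySem.Set.ofList (prev_groups.map Prod.fst)) (PySem.Set.ofList (curr_groups.map Prod.fst))) then
    false
  else
    pvStableLoop (PySem.Dict.mk curr_groups) prev_groups PySem.Dict.empty PySem.Dict.empty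

-- ===== PRECONDITION & SPEC =====
-- Pre_ excludes association lists with duplicate keys: they do not represent a Python dict
-- (dict construction collapses them before either function runs), so the ports' behaviour on them
-- is an artefact of the list encoding.
def Pre_groups_are_stable (prev_groups : List (String × Int)) (curr_groups : List (String × Int)) : Prop :=
  (prev_groups.map Prod.fst).Nodup ∧ (curr_groups.map Prod.fst).Nodup

instance (prev_groups : List (String × Int)) (curr_groups : List (String × Int)) :
    Decidable (Pre_groups_are_stable prev_groups curr_groups) := by
  unfold Pre_groups_are_stable; infer_instance

def pvWitness_groups_are_stable : (List (String × Int)) × (List (String × Int)) :=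
  ([("a", 1), ("b", 1), ("c", 2)], [("a", 5), ("b", 5), ("c", 7)])

def Spec_groups_are_stable (prev_groups : List (String × Int)) (curr_groups : List (String × Int)) (out : Bool) : Prop := out = groups_are_stable_alt prev_groups curr_groups
instance (prev_groups : List (String × Int)) (curr_groups : List (String × Int)) (out : Bool) : Decidable (Spec_groups_are_stable prev_groups curr_groups out) := by unfold Spec_groups_are_stable; infer_instance

-- ===== CLAIM (what is proved, stated in full; the proofs are below) =====
def Claim_equal_groups_are_stable : Prop := ∀ (prev_groups : List (String × Int)) (curr_groups : List (String × Int)), Dom_groups_are_stable prev_groups curr_groups → Pre_groups_are_stable prev_groups curr_groups → Spec_groups_are_stable prev_groups curr_groups (groups_are_stable prev_groups curr_groups)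

-- ===== LEMMAS AND PROOFS =====

-- ---- generic helpers about the relation check (B side) ----

-- 'the pairs (prev-label, curr-label) form a partial bijection'
def pvRelOK (R : List (Int × Int)) : Prop :=
  ∀ a b a' b', (a, b) ∈ R → (a', b') ∈ R → (a = a' ↔ b = b')

-- invariant of B's two maps: they store the same graph, in the two directions
def pvDInv (fwd bwd : PySem.Dict Int Int) : Prop :=
  (∀ a b, (a, b) ∈ fwd.items ↔ fwd.get? a = some b) ∧
  (∀ a b, (a, b) ∈ bwd.items ↔ bwd.get? a = some b) ∧
  (∀ a b, fwd.get? a = some b ↔ bwd.get? b = some a)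

def pvPairs (currD : PySem.Dict String Int) (l : List (String × Int)) : List (Int × Int) :=
  l.filterMap (fun pr => (currD.get? pr.1).map (fun c => (pr.2, c)))

lemma pvRelOK_congr {R R' : List (Int × Int)} (h : ∀ x, x ∈ R ↔ x ∈ R') :
    pvRelOK R ↔ pvRelOK R' := by
  unfold pvRelOK
  constructor <;> intro hr a b a' b' h1 h2
  · exact hr a b a' b' ((h _).2 h1) ((h _).2 h2)
  · exact hr a b a' b' ((h _).1 h1) ((h _).1 h2)

lemma pvDInv_relOK {fwd bwd : PySem.Dict Int Int} (h : pvDInv fwd bwd) :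
    pvRelOK fwd.items := by
  intro a b a' b' h1 h2
  have e1 := (h.1 a b).1 h1
  have e2 := (h.1 a' b').1 h2
  constructor
  · rintro rfl; rw [e1] at e2; exact Option.some_inj.1 e2
  · rintro rfl
    have f1 := (h.2.2 a b).1 e1
    have f2 := (h.2.2 a' b).1 e2
    rw [f1] at f2; exact Option.some_inj.1 f2

lemma pvSetdefault_getD (d : PySem.Dict Int Int) (k v : Int) :
    (d.setdefault k v).getD k v = (d.get? k).getD v := by
  rw [PySem.Dict.getD_eq_get?_getD, PySem.Dict.get?_setdefault_self, Option.getD_some]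

lemma pvDInv_insert {fwd bwd : PySem.Dict Int Int} (h : pvDInv fwd bwd) {p c : Int}
    (hf : fwd.get? p = none) (hb : bwd.get? c = none) :
    pvDInv (fwd.insert p c) (bwd.insert c p) := by
  have hfc : fwd.contains p = false := (PySem.Dict.get?_eq_none_iff_contains fwd p).1 hf
  have hbc : bwd.contains c = false := (PySem.Dict.get?_eq_none_iff_contains bwd c).1 hb
  have hfi := PySem.Dict.items_insert_of_not_contains fwd c hfc
  have hbi := PySem.Dict.items_insert_of_not_contains bwd p hbc
  refine ⟨?_, ?_, ?_⟩
  · intro a b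
    rw [hfi, PySem.Dict.get?_insert, List.mem_append, List.mem_singleton]
    constructor
    · rintro (hm | hm)
      · have hga := (h.1 a b).1 hm
        have hap : a ≠ p := by rintro rfl; rw [hf] at hga; cases hga
        rw [if_neg hap]; exact hga
      · have ha : a = p := congrArg Prod.fst hm
        have hbv : b = c := congrArg Prod.snd hm
        rw [if_pos ha, hbv]
    · intro hg
      by_cases hap : a = p
      · rw [if_pos hap] at hg
        exact Or.inr (by rw [Prod.mk.injEq]; exact ⟨hap, (Option.some_inj.1 hg).symm⟩)
      · rw [if_neg hap] at hg
        exact Or.inl ((h.1 a b).2 hg)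
  · intro a b
    rw [hbi, PySem.Dict.get?_insert, List.mem_append, List.mem_singleton]
    constructor
    · rintro (hm | hm)
      · have hga := (h.2.1 a b).1 hm
        have hac : a ≠ c := by rintro rfl; rw [hb] at hga; cases hga
        rw [if_neg hac]; exact hga
      · have ha : a = c := congrArg Prod.fst hm
        have hbv : b = p := congrArg Prod.snd hm
        rw [if_pos ha, hbv]
    · intro hg
      by_cases hac : a = c
      · rw [if_pos hac] at hg
        exact Or.inr (by rw [Prod.mk.injEq]; exact ⟨hac, (Option.some_inj.1 hg).symm⟩)
      · rw [if_neg hac] at hg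
        exact Or.inl ((h.2.1 a b).2 hg)
  · intro a b
    rw [PySem.Dict.get?_insert, PySem.Dict.get?_insert]
    by_cases hap : a = p <;> by_cases hbc' : b = c
    · rw [if_pos hap, if_pos hbc', hap, hbc']; simp
    · rw [if_pos hap, if_neg hbc']
      constructor
      · intro hs; exact absurd (Option.some_inj.1 hs).symm hbc'
      · intro hs
        have hv := (h.2.2 a b).2 hs
        rw [hap, hf] at hv; cases hv
    · rw [if_neg hap, if_pos hbc']
      constructor
      · intro hs
        have hv := (h.2.2 a b).1 hs
        rw [hbc', hb] at hv; cases hv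
      · intro hs; exact absurd (Option.some_inj.1 hs).symm hap
    · rw [if_neg hap, if_neg hbc']
      exact h.2.2 a b

-- characterisation of B's loop: it accepts iff every node is in curr and the
-- accumulated (prev-label, curr-label) relation is a partial bijection
lemma pvLoop_char (currD : PySem.Dict String Int) (l : List (String × Int))
    (fwd bwd : PySem.Dict Int Int) (h : pvDInv fwd bwd) :
    (pvStableLoop currD l fwd bwd = true ↔
      (∀ pr ∈ l, (currD.get? pr.1).isSome) ∧ pvRelOK (fwd.items ++ pvPairs currD l)) := by
  induction l generalizing fwd bwd with
  | nil =>
    constructor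
    · intro _
      refine ⟨fun pr hpr => absurd hpr List.not_mem_nil, ?_⟩
      have hp0 : pvPairs currD [] = [] := rfl
      rw [hp0, List.append_nil]
      exact pvDInv_relOK h
    · intro _; rfl
  | cons hd tl ih =>
    obtain ⟨node, p⟩ := hd
    cases hcd : currD.get? node with
    | none =>
      simp only [pvStableLoop, hcd]
      constructor
      · intro hfalse; cases hfalse
      · rintro ⟨hsome, -⟩
        have := hsome (node, p) List.mem_cons_self
        rw [hcd] at this; cases this
    | some c =>
      have hpairs : pvPairs currD ((node, p) :: tl) = (p, c) :: pvPairs currD tl := by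
        simp [pvPairs, hcd]
      rw [hpairs]
      simp only [pvStableLoop, hcd]
      have hheadsome : ((∀ pr ∈ (node, p) :: tl, (currD.get? pr.1).isSome) ↔
          (∀ pr ∈ tl, (currD.get? pr.1).isSome)) := by
        constructor
        · intro h1 pr hpr; exact h1 pr (List.mem_cons_of_mem _ hpr)
        · intro h1 pr hpr
          rcases List.mem_cons.1 hpr with rfl | hpr'
          · rw [hcd]; rfl
          · exact h1 pr hpr'
      cases hf : fwd.get? p with
      | some c0 =>
        have hfcon : fwd.contains p = true := by
          rw [PySem.Dict.contains_eq_isSome_get?, hf]; rfl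
        have hsd : fwd.setdefault p c = fwd := PySem.Dict.setdefault_of_contains fwd c hfcon
        have htest1 : (fwd.setdefault p c).getD p c = c0 := by
          rw [pvSetdefault_getD, hf, Option.getD_some]
        by_cases hc0 : c0 = c
        · subst hc0
          have hbv : bwd.get? c0 = some p := (h.2.2 p c0).1 hf
          have hbcon : bwd.contains c0 = true := by
            rw [PySem.Dict.contains_eq_isSome_get?, hbv]; rfl
          have hsb : bwd.setdefault c0 p = bwd := PySem.Dict.setdefault_of_contains bwd p hbcon
          have htest2 : (bwd.setdefault c0 p).getD c0 p = p := by
            rw [pvSetdefault_getD, hbv, Option.getD_some]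
          rw [if_neg (by rw [htest1, htest2]; simp)]
          rw [hsd, hsb, ih fwd bwd h, hheadsome]
          have hmemf : (p, c0) ∈ fwd.items := (h.1 p c0).2 hf
          have hcongr : pvRelOK (fwd.items ++ pvPairs currD tl) ↔
              pvRelOK (fwd.items ++ (p, c0) :: pvPairs currD tl) := by
            apply pvRelOK_congr
            intro x
            simp only [List.mem_append, List.mem_cons]
            constructor
            · rintro (hx | hx)
              · exact Or.inl hx
              · exact Or.inr (Or.inr hx)
            · rintro (hx | rfl | hx)
              · exact Or.inl hx
              · exact Or.inl hmemf
              · exact Or.inr hx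
          rw [hcongr]
        · -- c0 ≠ c : the forward test fails, and the relation is not functional
          rw [if_pos (Or.inl (by rw [htest1]; exact hc0))]
          constructor
          · intro hfalse; cases hfalse
          · rintro ⟨-, hrel⟩
            have hmemf : (p, c0) ∈ fwd.items ++ (p, c) :: pvPairs currD tl :=
              List.mem_append_left _ ((h.1 p c0).2 hf)
            have hmemp : (p, c) ∈ fwd.items ++ (p, c) :: pvPairs currD tl :=
              List.mem_append_right _ List.mem_cons_self
            exact absurd ((hrel p c0 p c hmemf hmemp).1 rfl) hc0
      | none =>
        have hfcon : fwd.contains p = false := (PySem.Dict.get?_eq_none_iff_contains fwd p).1 hf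
        have hsd : fwd.setdefault p c = fwd.insert p c :=
          PySem.Dict.setdefault_of_not_contains fwd c hfcon
        have htest1 : (fwd.setdefault p c).getD p c = c := by
          rw [pvSetdefault_getD, hf, Option.getD_none]
        cases hb : bwd.get? c with
        | some p0 =>
          have hp0 : fwd.get? p0 = some c := (h.2.2 p0 c).2 hb
          have hp0ne : p0 ≠ p := by
            rintro rfl; rw [hp0] at hf; cases hf
          have hbcon : bwd.contains c = true := by
            rw [PySem.Dict.contains_eq_isSome_get?, hb]; rfl
          have hsb : bwd.setdefault c p = bwd := PySem.Dict.setdefault_of_contains bwd p hbcon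
          have htest2 : (bwd.setdefault c p).getD c p = p0 := by
            rw [pvSetdefault_getD, hb, Option.getD_some]
          rw [if_pos (Or.inr (by rw [htest2]; exact hp0ne))]
          constructor
          · intro hfalse; cases hfalse
          · rintro ⟨-, hrel⟩
            have hmemf : (p0, c) ∈ fwd.items ++ (p, c) :: pvPairs currD tl :=
              List.mem_append_left _ ((h.1 p0 c).2 hp0)
            have hmemp : (p, c) ∈ fwd.items ++ (p, c) :: pvPairs currD tl :=
              List.mem_append_right _ List.mem_cons_self
            exact absurd ((hrel p0 c p c hmemf hmemp).2 rfl) hp0ne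
        | none =>
          have hbcon : bwd.contains c = false := (PySem.Dict.get?_eq_none_iff_contains bwd c).1 hb
          have hsb : bwd.setdefault c p = bwd.insert c p :=
            PySem.Dict.setdefault_of_not_contains bwd p hbcon
          have htest2 : (bwd.setdefault c p).getD c p = p := by
            rw [pvSetdefault_getD, hb, Option.getD_none]
          rw [if_neg (by rw [htest1, htest2]; simp)]
          rw [hsd, hsb, ih _ _ (pvDInv_insert h hf hb), hheadsome]
          have hitems : (fwd.insert p c).items = fwd.items ++ [(p, c)] :=
            PySem.Dict.items_insert_of_not_contains fwd c hfcon
          have hcongr : pvRelOK ((fwd.insert p c).items ++ pvPairs currD tl) ↔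
              pvRelOK (fwd.items ++ (p, c) :: pvPairs currD tl) := by
            apply pvRelOK_congr
            intro x
            rw [hitems]
            simp only [List.mem_append, List.mem_cons]
            tauto
          rw [hcongr]

lemma pvDInv_empty : pvDInv PySem.Dict.empty PySem.Dict.empty := by
  refine ⟨?_, ?_, ?_⟩ <;> intro a b <;>
    simp [PySem.Dict.empty, PySem.Dict.get?]

-- ---- A-side: the partition dict and the sets of frozensets ----

lemma pvPart_getD_mem (groups : List (String × Int)) (g : Int) (x : String) :
    x ∈ (pvPartitionDict groups).getD g PySem.Set.empty ↔ (x, g) ∈ groups := by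
  suffices h : ∀ (d : PySem.Dict Int (PySem.Set String)),
      x ∈ (groups.foldl (fun d pr => d.modify pr.2 PySem.Set.empty
            (fun s => PySem.Set.add s pr.1)) d).getD g PySem.Set.empty ↔
        x ∈ d.getD g PySem.Set.empty ∨ (x, g) ∈ groups by
    rw [pvPartitionDict, h PySem.Dict.empty]
    have he : (PySem.Dict.empty : PySem.Dict Int (PySem.Set String)).getD g PySem.Set.empty
        = PySem.Set.empty := rfl
    rw [he]
    simp [PySem.Set.empty]
  induction groups with
  | nil => intro d; simp
  | cons hd tl ih =>
    obtain ⟨n, lab⟩ := hd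
    intro d
    simp only [List.foldl_cons, List.mem_cons]
    rw [ih, PySem.Dict.getD_modify]
    by_cases hg : g = lab
    · subst hg
      rw [if_pos rfl, PySem.Set.mem_add]
      simp only [Prod.mk.injEq]
      tauto
    · rw [if_neg hg]
      simp only [Prod.mk.injEq]
      constructor
      · rintro (hm | hm)
        · exact Or.inl hm
        · exact Or.inr (Or.inr hm)
      · rintro (hm | ⟨-, hlab⟩ | hm)
        · exact Or.inl hm
        · exact absurd hlab hg
        · exact Or.inr hm

lemma pvPart_keys (groups : List (String × Int)) :
    (pvPartitionDict groups).keys = PySem.Set.ofList (groups.map Prod.snd) := by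
  rw [pvPartitionDict]
  rw [PySem.Dict.keys_foldl_modify_key groups Prod.snd PySem.Set.empty
    (fun _ pr => fun s => PySem.Set.add s pr.1) PySem.Dict.empty]
  rw [PySem.Dict.keys_empty, PySem.Set.update_nil_left]

lemma pvPart_keys_nodup (groups : List (String × Int)) :
    (pvPartitionDict groups).keys.Nodup := by
  rw [pvPart_keys]; exact PySem.Set.nodup_ofList _

lemma pvPart_values (groups : List (String × Int)) :
    (pvPartitionDict groups).values =
      (PySem.Set.ofList (groups.map Prod.snd)).map
        (fun g => (pvPartitionDict groups).getD g PySem.Set.empty) := by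
  rw [← pvPart_keys]
  exact PySem.Dict.values_eq_map_keys _ (pvPart_keys_nodup groups) _

-- PySem.Set.equal is reflexive, symmetric, transitive (as set equality)
lemma pvEq_refl (s : PySem.Set String) : PySem.Set.equal s s = true := by
  rw [PySem.Set.equal_iff]; intro x; rfl

lemma pvEq_symm {s t : PySem.Set String} (h : PySem.Set.equal s t = true) :
    PySem.Set.equal t s = true := by
  rw [PySem.Set.equal_iff] at *; intro x; exact (h x).symm

lemma pvEq_trans {s t u : PySem.Set String} (h1 : PySem.Set.equal s t = true)
    (h2 : PySem.Set.equal t u = true) : PySem.Set.equal s u = true := by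
  rw [PySem.Set.equal_iff] at *; intro x; exact (h1 x).trans (h2 x)

lemma pvSetOfSets_subset {vs : List (PySem.Set String)} {t : PySem.Set String}
    (h : t ∈ pvSetOfSets vs) : t ∈ vs := by
  rw [pvSetOfSets] at h
  suffices hg : ∀ acc, t ∈ vs.foldl (fun acc s =>
      if acc.any (fun t => PySem.Set.equal t s) then acc else acc ++ [s]) acc →
      t ∈ acc ∨ t ∈ vs by
    rcases hg [] h with hm | hm
    · exact absurd hm List.not_mem_nil
    · exact hm
  clear h
  induction vs with
  | nil => intro acc h; exact Or.inl h
  | cons hd tl ih =>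
    intro acc h
    simp only [List.foldl_cons] at h
    by_cases hc : acc.any (fun t => PySem.Set.equal t hd) = true
    · rw [if_pos hc] at h
      rcases ih acc h with hm | hm
      · exact Or.inl hm
      · exact Or.inr (List.mem_cons_of_mem _ hm)
    · rw [if_neg hc] at h
      rcases ih _ h with hm | hm
      · rcases List.mem_append.1 hm with hm' | hm'
        · exact Or.inl hm'
        · exact Or.inr (List.mem_cons.2 (Or.inl (List.mem_singleton.1 hm')))
      · exact Or.inr (List.mem_cons_of_mem _ hm)

lemma pvSetOfSets_exists (x : PySem.Set String) (vs : List (PySem.Set String)) :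
    (∃ t ∈ pvSetOfSets vs, PySem.Set.equal x t = true) ↔
      (∃ t ∈ vs, PySem.Set.equal x t = true) := by
  rw [pvSetOfSets]
  suffices hg : ∀ acc, (∃ t ∈ vs.foldl (fun acc s =>
      if acc.any (fun t => PySem.Set.equal t s) then acc else acc ++ [s]) acc,
        PySem.Set.equal x t = true) ↔
      ((∃ t ∈ acc, PySem.Set.equal x t = true) ∨ (∃ t ∈ vs, PySem.Set.equal x t = true)) by
    rw [hg []]; simp
  induction vs with
  | nil => intro acc; simp
  | cons hd tl ih =>
    intro acc
    simp only [List.foldl_cons]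
    by_cases hc : acc.any (fun t => PySem.Set.equal t hd) = true
    · rw [if_pos hc, ih acc]
      rcases List.any_eq_true.1 hc with ⟨t0, ht0, heq⟩
      constructor
      · rintro (hm | ⟨t, ht, heq'⟩)
        · exact Or.inl hm
        · exact Or.inr ⟨t, List.mem_cons_of_mem _ ht, heq'⟩
      · rintro (hm | ⟨t, ht, heq'⟩)
        · exact Or.inl hm
        · rcases List.mem_cons.1 ht with rfl | ht'
          · exact Or.inl ⟨t0, ht0, pvEq_trans heq' (pvEq_symm heq)⟩
          · exact Or.inr ⟨t, ht', heq'⟩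
    · rw [if_neg hc, ih _]
      constructor
      · rintro (⟨t, ht, heq⟩ | ⟨t, ht, heq⟩)
        · rcases List.mem_append.1 ht with ht' | ht'
          · exact Or.inl ⟨t, ht', heq⟩
          · exact Or.inr ⟨hd, List.mem_cons_self, by rw [← List.mem_singleton.1 ht']; exact heq⟩
        · exact Or.inr ⟨t, List.mem_cons_of_mem _ ht, heq⟩
      · rintro (⟨t, ht, heq⟩ | ⟨t, ht, heq⟩)
        · exact Or.inl ⟨t, List.mem_append_left _ ht, heq⟩
        · rcases List.mem_cons.1 ht with rfl | ht'
          · exact Or.inl ⟨t, List.mem_append_right _ (List.mem_singleton.2 rfl), heq⟩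
          · exact Or.inr ⟨t, ht', heq⟩

lemma pvForallExists_setOfSets (vs ws : List (PySem.Set String)) :
    ((pvSetOfSets vs).all (fun x => (pvSetOfSets ws).any
        (fun y => PySem.Set.equal x y)) = true) ↔
      (∀ x ∈ vs, ∃ y ∈ ws, PySem.Set.equal x y = true) := by
  rw [List.all_eq_true]
  constructor
  · intro h x hx
    obtain ⟨t, ht, hxt⟩ := (pvSetOfSets_exists x vs).2 ⟨x, hx, pvEq_refl x⟩
    obtain ⟨y, hy, hty⟩ := List.any_eq_true.1 (h t ht)
    obtain ⟨y', hy', hty'⟩ := (pvSetOfSets_exists t ws).1 ⟨y, hy, hty⟩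
    exact ⟨y', hy', pvEq_trans hxt hty'⟩
  · intro h x hx
    obtain ⟨y, hy, hxy⟩ := h x (pvSetOfSets_subset hx)
    obtain ⟨t, ht, hxt⟩ := (pvSetOfSets_exists x ws).2 ⟨y, hy, hxy⟩
    exact List.any_eq_true.2 ⟨t, ht, hxt⟩

-- A's comparison, characterised over the group labels
lemma pvA_char (prev curr : List (String × Int)) :
    (pvPartsEq (pvGetPartition prev) (pvGetPartition curr) = true ↔
      ((∀ g ∈ prev.map Prod.snd, ∃ h ∈ curr.map Prod.snd,
          PySem.Set.equal ((pvPartitionDict prev).getD g PySem.Set.empty)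
            ((pvPartitionDict curr).getD h PySem.Set.empty) = true) ∧
       (∀ h ∈ curr.map Prod.snd, ∃ g ∈ prev.map Prod.snd,
          PySem.Set.equal ((pvPartitionDict curr).getD h PySem.Set.empty)
            ((pvPartitionDict prev).getD g PySem.Set.empty) = true))) := by
  rw [pvPartsEq, Bool.and_eq_true, pvGetPartition, pvGetPartition,
    pvForallExists_setOfSets, pvForallExists_setOfSets]
  rw [pvPart_values prev, pvPart_values curr]
  constructor
  · rintro ⟨h1, h2⟩
    constructor
    · intro g hg
      obtain ⟨y, hy, hxy⟩ := h1 _ (List.mem_map_of_mem ((PySem.Set.mem_ofList _ _).2 hg))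
      obtain ⟨h', hh', rfl⟩ := List.mem_map.1 hy
      exact ⟨h', (PySem.Set.mem_ofList _ _).1 hh', hxy⟩
    · intro h' hh'
      obtain ⟨y, hy, hxy⟩ := h2 _ (List.mem_map_of_mem ((PySem.Set.mem_ofList _ _).2 hh'))
      obtain ⟨g, hg, rfl⟩ := List.mem_map.1 hy
      exact ⟨g, (PySem.Set.mem_ofList _ _).1 hg, hxy⟩
  · rintro ⟨h1, h2⟩
    constructor
    · intro x hx
      obtain ⟨g, hg, rfl⟩ := List.mem_map.1 hx
      obtain ⟨h', hh', hxy⟩ := h1 g ((PySem.Set.mem_ofList _ _).1 hg)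
      exact ⟨_, List.mem_map_of_mem ((PySem.Set.mem_ofList _ _).2 hh'), hxy⟩
    · intro x hx
      obtain ⟨h', hh', rfl⟩ := List.mem_map.1 hx
      obtain ⟨g, hg, hxy⟩ := h2 h' ((PySem.Set.mem_ofList _ _).1 hh')
      exact ⟨_, List.mem_map_of_mem ((PySem.Set.mem_ofList _ _).2 hg), hxy⟩

-- ---- the bridge: partitions equal  ↔  the label relation is a bijection ----

lemma pvGet?_mk_iff (curr : List (String × Int)) (hC : (curr.map Prod.fst).Nodup)
    (x : String) (c : Int) :
    (PySem.Dict.mk curr).get? x = some c ↔ (x, c) ∈ curr := by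
  have hkeys : (PySem.Dict.mk curr).keys.Nodup := by
    rw [PySem.Dict.keys_mk]; exact hC
  exact PySem.Dict.get?_eq_some_iff_mem_items (PySem.Dict.mk curr) x c hkeys

lemma pvNodup_val_eq {l : List (String × Int)} (h : (l.map Prod.fst).Nodup)
    {x : String} {g g' : Int} (h1 : (x, g) ∈ l) (h2 : (x, g') ∈ l) : g = g' := by
  have heq : (x, g) = (x, g') := List.inj_on_of_nodup_map h h1 h2 rfl
  exact congrArg Prod.snd heq

lemma pvBridge (prev curr : List (String × Int))
    (hP : (prev.map Prod.fst).Nodup) (hC : (curr.map Prod.fst).Nodup)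
    (hK : ∀ x, x ∈ prev.map Prod.fst ↔ x ∈ curr.map Prod.fst) :
    pvPartsEq (pvGetPartition prev) (pvGetPartition curr) =
      pvStableLoop (PySem.Dict.mk curr) prev PySem.Dict.empty PySem.Dict.empty := by
  have hsome : ∀ pr ∈ prev, ((PySem.Dict.mk curr).get? pr.1).isSome := by
    intro pr hpr
    obtain ⟨pc, hpc, heq⟩ := List.mem_map.1 ((hK pr.1).1 (List.mem_map_of_mem hpr))
    have hx : (pr.1, pc.2) ∈ curr := by
      have hpc' : (pc.1, pc.2) ∈ curr := by simpa using hpc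
      rwa [heq] at hpc' 
    rw [(pvGet?_mk_iff curr hC pr.1 pc.2).2 hx]; rfl
  have hmemrel : ∀ a b : Int, ((a, b) ∈ pvPairs (PySem.Dict.mk curr) prev ↔
      ∃ x, (x, a) ∈ prev ∧ (x, b) ∈ curr) := by
    intro a b
    rw [pvPairs]
    simp only [List.mem_filterMap, Option.map_eq_some_iff]
    constructor
    · rintro ⟨pr, hpr, c, hc, heq⟩
      have ha : pr.2 = a := congrArg Prod.fst heq
      have hb : c = b := congrArg Prod.snd heq
      subst ha; subst hb
      exact ⟨pr.1, by simpa using hpr, (pvGet?_mk_iff curr hC _ _).1 hc⟩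
    · rintro ⟨x, hxa, hxb⟩
      exact ⟨(x, a), hxa, b, (pvGet?_mk_iff curr hC _ _).2 hxb, rfl⟩
  rw [Bool.eq_iff_iff]
  rw [pvLoop_char (PySem.Dict.mk curr) prev _ _ pvDInv_empty]
  have hempty : (PySem.Dict.empty : PySem.Dict Int Int).items = [] := rfl
  rw [hempty, List.nil_append]
  rw [pvA_char]
  have hxc : ∀ x ∈ prev.map Prod.fst, ∃ c, (x, c) ∈ curr := by
    intro x hx
    obtain ⟨pc, hpc, heq⟩ := List.mem_map.1 ((hK x).1 hx)
    refine ⟨pc.2, ?_⟩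
    have hpc' : (pc.1, pc.2) ∈ curr := by simpa using hpc
    rwa [heq] at hpc' 
  have hxp : ∀ x ∈ curr.map Prod.fst, ∃ g, (x, g) ∈ prev := by
    intro x hx
    obtain ⟨pc, hpc, heq⟩ := List.mem_map.1 ((hK x).2 hx)
    refine ⟨pc.2, ?_⟩
    have hpc' : (pc.1, pc.2) ∈ prev := by simpa using hpc
    rwa [heq] at hpc' 
  constructor
  · -- partitions equal → relation is a bijection
    rintro ⟨h1, h2⟩
    refine ⟨hsome, ?_⟩
    intro a b a' b' hab hab'
    obtain ⟨x, hxa, hxb⟩ := (hmemrel a b).1 hab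
    obtain ⟨x', hxa', hxb'⟩ := (hmemrel a' b').1 hab'
    constructor
    · rintro rfl
      obtain ⟨h', hh', heq⟩ := h1 a (List.mem_map_of_mem hxa)
      rw [PySem.Set.equal_iff] at heq
      have hx := (heq x).1 ((pvPart_getD_mem prev a x).2 hxa)
      have hx' := (heq x').1 ((pvPart_getD_mem prev a x').2 hxa')
      rw [pvPart_getD_mem] at hx hx'
      rw [pvNodup_val_eq hC hxb hx, pvNodup_val_eq hC hxb' hx']
    · rintro rfl
      obtain ⟨g, hg, heq⟩ := h2 b (List.mem_map_of_mem hxb)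
      rw [PySem.Set.equal_iff] at heq
      have hx := (heq x).1 ((pvPart_getD_mem curr b x).2 hxb)
      have hx' := (heq x').1 ((pvPart_getD_mem curr b x').2 hxb')
      rw [pvPart_getD_mem] at hx hx'
      rw [pvNodup_val_eq hP hxa hx, pvNodup_val_eq hP hxa' hx']
  · -- relation is a bijection → partitions equal
    rintro ⟨h1, hrel⟩
    constructor
    · intro g hg
      obtain ⟨pr, hpr, heq⟩ := List.mem_map.1 hg
      have hprg : (pr.1, g) ∈ prev := by rw [← heq]; simpa using hpr
      obtain ⟨c, hc⟩ := hxc pr.1 (List.mem_map_of_mem hpr)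
      refine ⟨c, List.mem_map_of_mem hc, ?_⟩
      rw [PySem.Set.equal_iff]
      intro x
      rw [pvPart_getD_mem, pvPart_getD_mem]
      have hm2 : (g, c) ∈ pvPairs (PySem.Dict.mk curr) prev :=
        (hmemrel g c).2 ⟨pr.1, hprg, hc⟩
      constructor
      · intro hxg
        obtain ⟨cx, hcx⟩ := hxc x (List.mem_map_of_mem hxg)
        have hm1 : (g, cx) ∈ pvPairs (PySem.Dict.mk curr) prev :=
          (hmemrel g cx).2 ⟨x, hxg, hcx⟩
        rw [← (hrel g cx g c hm1 hm2).1 rfl]; exact hcx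
      · intro hxc'
        obtain ⟨gx, hgx⟩ := hxp x (List.mem_map_of_mem hxc')
        have hm1 : (gx, c) ∈ pvPairs (PySem.Dict.mk curr) prev :=
          (hmemrel gx c).2 ⟨x, hgx, hxc'⟩
        rw [← (hrel gx c g c hm1 hm2).2 rfl]; exact hgx
    · intro c hc
      obtain ⟨pr, hpr, heq⟩ := List.mem_map.1 hc
      have hprc : (pr.1, c) ∈ curr := by rw [← heq]; simpa using hpr
      obtain ⟨g, hg⟩ := hxp pr.1 (List.mem_map_of_mem hpr)
      refine ⟨g, List.mem_map_of_mem hg, ?_⟩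
      rw [PySem.Set.equal_iff]
      intro x
      rw [pvPart_getD_mem, pvPart_getD_mem]
      have hm2 : (g, c) ∈ pvPairs (PySem.Dict.mk curr) prev :=
        (hmemrel g c).2 ⟨pr.1, hg, hprc⟩
      constructor
      · intro hxc'
        obtain ⟨gx, hgx⟩ := hxp x (List.mem_map_of_mem hxc')
        have hm1 : (gx, c) ∈ pvPairs (PySem.Dict.mk curr) prev :=
          (hmemrel gx c).2 ⟨x, hgx, hxc'⟩
        rw [← (hrel gx c g c hm1 hm2).2 rfl]; exact hgx
      · intro hxg
        obtain ⟨cx, hcx⟩ := hxc x (List.mem_map_of_mem hxg)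
        have hm1 : (g, cx) ∈ pvPairs (PySem.Dict.mk curr) prev :=
          (hmemrel g cx).2 ⟨x, hxg, hcx⟩
        rw [← (hrel g cx g c hm1 hm2).1 rfl]; exact hcx

-- ===== VERDICT (by name: the statement is the Claim_ definition above) =====
theorem groups_are_stable_spec : Claim_equal_groups_are_stable := by
  intro prev curr _ hpre
  unfold Spec_groups_are_stable groups_are_stable groups_are_stable_alt
  cases hq : PySem.Set.equal (PySem.Set.ofList (prev.map Prod.fst))
      (PySem.Set.ofList (curr.map Prod.fst)) with
  | false => simp
  | true =>
    simp only [Bool.not_true, Bool.false_eq_true, if_false]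
    have hK : ∀ x, x ∈ prev.map Prod.fst ↔ x ∈ curr.map Prod.fst := by
      intro x
      have := (PySem.Set.equal_iff _ _).1 hq x
      rw [PySem.Set.mem_ofList, PySem.Set.mem_ofList] at this
      exact this
    exact pvBridge prev curr hpre.1 hpre.2 hK
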